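-- pv_equiv track=rewrite | github.com/Mario-bgt/python_for_physics | scientific_computing/puzzle/puzzle_5/puzzle_5_backup.py | timevar
-- ===== SOURCE A (Python) =====
-- def timevar(indic, c, year):
--     x = []
--     y = []
--     for t in range(1995, year):
--         if t in indic[c]:
--             x.append(t)
--             y.append(indic[c][t])
--     return x, y
-- ===== SOURCE B (Python) =====
-- def timevar(indic, c, year):
--     items = sorted((p for p in indic.get(c, {}).items() if 1995 <= p[0] < year),
--                    key=lambda p: p[0])
--     return [t for t, _ in items], [v for _, v in items]
-- ===== Notes on version B (the rewrite author's own statement) =====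
-- stated objective: idiomatic
-- what changed: Instead of scanning every year in range(1995, year) and probing the dict, B filters the dict's own items to the [1995, year) window, sorts them by year, and unzips; Pre_ excludes only the inputs where A raises KeyError (c absent with a non-empty range) and, on the Lean side, association lists with duplicate inner keys, which no Python dict can produce.
import Mathlib
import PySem

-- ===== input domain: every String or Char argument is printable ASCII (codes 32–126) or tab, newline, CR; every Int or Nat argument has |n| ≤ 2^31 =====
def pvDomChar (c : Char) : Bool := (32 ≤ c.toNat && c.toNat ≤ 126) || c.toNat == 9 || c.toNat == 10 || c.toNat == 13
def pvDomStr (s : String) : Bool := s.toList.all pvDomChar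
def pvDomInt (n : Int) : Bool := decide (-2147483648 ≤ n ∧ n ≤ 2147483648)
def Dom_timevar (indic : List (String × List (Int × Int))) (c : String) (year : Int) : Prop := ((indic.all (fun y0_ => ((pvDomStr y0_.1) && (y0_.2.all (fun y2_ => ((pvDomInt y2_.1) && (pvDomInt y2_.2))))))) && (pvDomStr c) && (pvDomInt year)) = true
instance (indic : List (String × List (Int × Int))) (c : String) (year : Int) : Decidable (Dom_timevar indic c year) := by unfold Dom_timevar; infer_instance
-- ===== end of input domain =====

-- B replaces A's probe-every-year-in-range loop by filter-sort-unzip over the dict's own items (idiomatic).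

-- ===== PORT A =====
-- A's `indic[c]` raises KeyError when c is absent and the range is non-empty; that case is outside Pre_ (the `none` arm is a totality guard).
def timevar (indic : List (String × List (Int × Int))) (c : String) (year : Int) : List Int × List Int :=
  match indic.find? (fun p => p.1 == c) with
  | none => ([], [])
  | some p =>
    (PySem.List.pyRange 1995 year 1).foldl
      (fun (st : List Int × List Int) t =>
        match p.2.find? (fun q => q.1 == t) with
        | some q => (st.1 ++ [t], st.2 ++ [q.2])
        | none => st) ([], [])

-- ===== PORT B =====
def timevar_alt (indic : List (String × List (Int × Int))) (c : String) (year : Int) : List Int × List Int :=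
  match indic.find? (fun p => p.1 == c) with
  | none => ([], [])
  | some p =>
    let items := PySem.List.sorted
      (p.2.filter (fun q => decide (1995 ≤ q.1) && decide (q.1 < year)))
      (fun q => q.1)
    (items.map Prod.fst, items.map Prod.snd)

-- ===== PRECONDITION & SPEC =====
-- Pre_ excludes (i) c not a key of indic, where Python A raises KeyError, and (ii) association
-- lists whose inner dict (the one looked up) has duplicate keys — such lists represent no Python
-- dict at all, so A never returns on them as Python inputs.
def Pre_timevar (indic : List (String × List (Int × Int))) (c : String) (year : Int) : Prop :=
  (c ∈ indic.map Prod.fst ∨ year ≤ 1995) ∧ ∀ p ∈ indic, p.1 = c → (p.2.map Prod.fst).Nodup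
instance (indic : List (String × List (Int × Int))) (c : String) (year : Int) : Decidable (Pre_timevar indic c year) := by unfold Pre_timevar; infer_instance

def pvWitness_timevar : (List (String × List (Int × Int))) × String × Int :=
  ([("DE", [(1996, 5), (1998, 7)])], "DE", 2000)

def Spec_timevar (indic : List (String × List (Int × Int))) (c : String) (year : Int) (out : List Int × List Int) : Prop := out = timevar_alt indic c year
instance (indic : List (String × List (Int × Int))) (c : String) (year : Int) (out : List Int × List Int) : Decidable (Spec_timevar indic c year out) := by unfold Spec_timevar; infer_instance

-- ===== CLAIM (what is proved, stated in full; the proofs are below) =====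
def Claim_equal_timevar : Prop := ∀ (indic : List (String × List (Int × Int))) (c : String) (year : Int), Dom_timevar indic c year → Pre_timevar indic c year → Spec_timevar indic c year (timevar indic c year)

-- ===== LEMMAS AND PROOFS =====

-- the (t, value) pairs A collects while scanning the years ts
def pvCollect (d : List (Int × Int)) (ts : List Int) : List (Int × Int) :=
  ts.filterMap (fun t => (d.find? (fun q => q.1 == t)).map (fun q => (t, q.2)))

theorem pvFold_eq (d : List (Int × Int)) (ts : List Int) (x y : List Int) :
    ts.foldl (fun (st : List Int × List Int) t =>
        match d.find? (fun q => q.1 == t) with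
        | some q => (st.1 ++ [t], st.2 ++ [q.2])
        | none => st) (x, y)
      = (x ++ (pvCollect d ts).map Prod.fst, y ++ (pvCollect d ts).map Prod.snd) := by
  induction ts generalizing x y with
  | nil => simp [pvCollect]
  | cons t ts ih =>
    simp only [List.foldl_cons, pvCollect, List.filterMap_cons]
    cases h : d.find? (fun q => q.1 == t) with
    | none => simpa [pvCollect, h] using ih x y
    | some q => simpa [pvCollect, h] using ih (x ++ [t]) (y ++ [q.2])

theorem pvCollect_pairwise (d : List (Int × Int)) (ts : List Int)
    (h : ts.Pairwise (· < ·)) :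
    (pvCollect d ts).Pairwise (fun a b => a.1 < b.1) := by
  unfold pvCollect
  rw [List.pairwise_filterMap]
  refine h.imp_of_mem ?_
  intro a b _ _ hab p hp p' hp'
  cases hfa : d.find? (fun q => q.1 == a) <;> rw [hfa] at hp <;> simp at hp
  cases hfb : d.find? (fun q => q.1 == b) <;> rw [hfb] at hp' <;> simp at hp'
  simp [← hp, ← hp', hab]

theorem pvFind_of_mem (d : List (Int × Int)) (q : Int × Int)
    (hnd : (d.map Prod.fst).Nodup) (hq : q ∈ d) :
    d.find? (fun r => r.1 == q.1) = some q := by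
  induction d with
  | nil => simp at hq
  | cons r d ih =>
    simp only [List.map_cons, List.nodup_cons] at hnd
    rcases List.mem_cons.mp hq with h | h
    · subst h; simp [List.find?]
    · have hne : r.1 ≠ q.1 := fun e => hnd.1 (e ▸ List.mem_map_of_mem (f := Prod.fst) h)
      have hb : (r.1 == q.1) = false := beq_eq_false_iff_ne.mpr hne
      simp [List.find?, hb, ih hnd.2 h]

theorem pvCollect_mem (d : List (Int × Int)) (a b : Int)
    (hnd : (d.map Prod.fst).Nodup) (p : Int × Int) :
    p ∈ pvCollect d (PySem.List.pyRange a b 1) ↔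
      (a ≤ p.1 ∧ p.1 < b) ∧ p ∈ d := by
  unfold pvCollect
  simp only [List.mem_filterMap, Option.map_eq_some_iff]
  constructor
  · rintro ⟨t, ht, q, hfq, rfl⟩
    have hq := List.mem_of_find?_eq_some hfq
    have hqt : q.1 = t := by simpa using List.find?_some hfq
    rw [PySem.List.mem_pyRange_one] at ht
    exact ⟨ht, by rw [← hqt] at *; exact hq⟩
  · rintro ⟨⟨h1, h2⟩, hp⟩
    exact ⟨p.1, PySem.List.mem_pyRange_one.mpr ⟨h1, h2⟩, p, pvFind_of_mem d p hnd hp, rfl⟩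

theorem pvCollect_perm (d : List (Int × Int)) (a b : Int)
    (hnd : (d.map Prod.fst).Nodup) :
    (pvCollect d (PySem.List.pyRange a b 1)).Perm
      (d.filter (fun q => decide (a ≤ q.1) && decide (q.1 < b))) := by
  have hpw := pvCollect_pairwise d (PySem.List.pyRange a b 1)
      (PySem.List.pairwise_lt_pyRange_one a b)
  have hnd1 : (pvCollect d (PySem.List.pyRange a b 1)).Nodup :=
    List.Pairwise.imp (fun h => by rintro rfl; exact lt_irrefl _ h) hpw
  have hnd2 : (d.filter (fun q => decide (a ≤ q.1) && decide (q.1 < b))).Nodup :=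
    (List.Nodup.of_map Prod.fst hnd).filter _
  rw [List.perm_ext_iff_of_nodup hnd1 hnd2]
  intro p
  rw [pvCollect_mem d a b hnd p, List.mem_filter]
  simp [and_comm]

-- ===== VERDICT (by name: the statement is the Claim_ definition above) =====
theorem timevar_spec : Claim_equal_timevar := by
  intro indic c year _ hpre
  unfold Spec_timevar timevar timevar_alt
  obtain ⟨_, hnd⟩ := hpre
  cases hf : indic.find? (fun p => p.1 == c) with
  | none => rfl
  | some p =>
    have hpmem := List.mem_of_find?_eq_some hf
    have hpc : p.1 = c := by simpa using List.find?_some hf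
    have hndp : (p.2.map Prod.fst).Nodup := hnd p hpmem hpc
    dsimp only
    rw [pvFold_eq p.2 (PySem.List.pyRange 1995 year 1) [] []]
    have := PySem.List.sorted_eq_of_perm_of_pairwise_lt
        (p.2.filter (fun q => decide (1995 ≤ q.1) && decide (q.1 < year)))
        (pvCollect p.2 (PySem.List.pyRange 1995 year 1)) (fun q => q.1)
        (pvCollect_perm p.2 1995 year hndp)
        (pvCollect_pairwise p.2 _ (PySem.List.pairwise_lt_pyRange_one 1995 year))
    simp [this]
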